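-- pv_equiv track=rewrite | github.com/koii-network/prometheus-beta | src/word_position_tracker.py | track_word_positions
-- ===== SOURCE A (Python) =====
-- def track_word_positions(text):
--     """
--     Takes a string of text and returns a dictionary of words with their positions.
--
--     Args:
--         text (str): Input text to analyze.
--
--     Returns:
--         dict: A dictionary where keys are unique words and values are sorted lists of their positions.
--
--     Example:
--         >>> track_word_positions("hello world hello")
--         {'hello': [0, 2], 'world': [1]}
--     """
--     # Split the text into words and remove any leading/trailing whitespace
--     words = text.split()
--
--     # Create a dictionary to store word positions
--     word_positions = {}
--
--     # Iterate through words and track their positions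
--     for position, word in enumerate(words):
--         # Normalize the word by converting to lowercase
--         normalized_word = word.lower()
--
--         # Add the position to the word's list of positions
--         if normalized_word not in word_positions:
--             word_positions[normalized_word] = [position]
--         else:
--             word_positions[normalized_word].append(position)
--
--     return word_positions
-- ===== SOURCE B (Python) =====
-- def track_word_positions(text):
--     words = [w.lower() for w in text.split()]
--     return {w: [i for i, x in enumerate(words) if x == w] for w in dict.fromkeys(words)}
-- ===== Notes on version B (the rewrite author's own statement) =====
-- stated objective: alternative
-- what changed: Replaces A's single accumulating dict pass with a two-phase comprehension: normalize once, take ordered unique keys via dict.fromkeys, and collect each word's positions by a per-key scan of the word list.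
import Mathlib
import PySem

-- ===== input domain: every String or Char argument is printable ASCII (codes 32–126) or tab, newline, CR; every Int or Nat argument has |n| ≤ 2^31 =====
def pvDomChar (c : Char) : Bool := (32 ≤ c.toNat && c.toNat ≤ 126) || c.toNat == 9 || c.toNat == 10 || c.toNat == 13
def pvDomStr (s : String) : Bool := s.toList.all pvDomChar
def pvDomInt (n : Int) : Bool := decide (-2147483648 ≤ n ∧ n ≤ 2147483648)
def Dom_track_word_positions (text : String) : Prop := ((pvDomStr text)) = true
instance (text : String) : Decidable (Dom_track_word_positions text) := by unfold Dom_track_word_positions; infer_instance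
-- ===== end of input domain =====

-- B replaces A's single accumulating dict pass by ordered-unique keys plus a per-key scan
-- collecting positions (alternative decomposition, not claimed faster).

-- ===== PORT A =====
-- A: split, then one pass over enumerate(words) accumulating positions in a dict.
def track_word_positions (text : String) : List (String × List Int) :=
  let words := PySem.Str.split₀ text
  let word_positions :=
    (PySem.List.enumerate words).foldl
      (fun d p =>
        let normalized_word := PySem.Str.lower p.2
        if d.contains normalized_word = false then
          d.insert normalized_word [p.1]
        else
          d.modify normalized_word [] (fun l => l ++ [p.1]))
      PySem.Dict.empty
  word_positions.items

-- ===== PORT B =====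
-- B: lowercase all words once, take ordered unique keys (dict.fromkeys), and for each key
-- scan enumerate(words) collecting the matching indices.
def track_word_positions_alt (text : String) : List (String × List Int) :=
  let words := (PySem.Str.split₀ text).map PySem.Str.lower
  (PySem.List.dedup words).map (fun w =>
    (w, (List.filter (fun p => p.2 == w) (PySem.List.enumerate words)).map (fun p => p.1)))

-- ===== PRECONDITION & SPEC =====
def Spec_track_word_positions (text : String) (out : List (String × List Int)) : Prop := out = track_word_positions_alt text
instance (text : String) (out : List (String × List Int)) : Decidable (Spec_track_word_positions text out) := by unfold Spec_track_word_positions; infer_instance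

-- ===== CLAIM (what is proved, stated in full; the proofs are below) =====
def Claim_equal_track_word_positions : Prop := ∀ (text : String), Dom_track_word_positions text → Spec_track_word_positions text (track_word_positions text)

-- ===== LEMMAS AND PROOFS =====

-- A's branchy loop body is exactly `modify` (append-with-default), since Dict.modify
-- inserts f(dflt) when the key is absent.
theorem pv_step_eq_modify (d : PySem.Dict String (List Int)) (k : String) (i : Int) :
    (if d.contains k = false then d.insert k [i] else d.modify k [] (fun l => l ++ [i]))
      = d.modify k [] (fun l => l ++ [i]) := by
  by_cases h : d.contains k = false
  · simp only [h, if_true, PySem.Dict.modify, PySem.Dict.getD_of_not_contains d ([] : List Int) h,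
      List.nil_append]
  · simp [h]

theorem pv_enumerate_map {α β : Type} (f : α → β) (xs : List α) (s : Int) :
    PySem.List.enumerate (xs.map f) s
      = (PySem.List.enumerate xs s).map (fun p => (p.1, f p.2)) := by
  induction xs generalizing s with
  | nil => simp [PySem.List.enumerate_nil]
  | cons x xs ih => simp [PySem.List.enumerate_cons, ih]

theorem pv_main (text : String) :
    track_word_positions text = track_word_positions_alt text := by
  unfold track_word_positions track_word_positions_alt
  simp only [pv_step_eq_modify]
  set words := PySem.Str.split₀ text with hw
  set e := PySem.List.enumerate words with he
  have hnd : (List.foldl (fun d p =>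
      d.modify (PySem.Str.lower p.2) [] (fun l => l ++ [p.1]))
      (PySem.Dict.empty : PySem.Dict String (List Int)) e).keys.Nodup := by
    exact PySem.Dict.nodup_keys_foldl_modify_key e (fun p => PySem.Str.lower p.2) []
      (fun _ p l => l ++ [p.1]) PySem.Dict.empty (by simp)
  rw [PySem.Dict.items_eq_map_keys _ hnd ([] : List Int)]
  have hkeys : (List.foldl (fun d p =>
      d.modify (PySem.Str.lower p.2) [] (fun l => l ++ [p.1]))
      (PySem.Dict.empty : PySem.Dict String (List Int)) e).keys
      = PySem.List.dedup (words.map PySem.Str.lower) := by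
    rw [PySem.Dict.keys_foldl_modify_key e (fun p => PySem.Str.lower p.2) []
      (fun _ p l => l ++ [p.1]) PySem.Dict.empty]
    have : e.map (fun p => PySem.Str.lower p.2) = words.map PySem.Str.lower := by
      rw [he, show (fun p : Int × String => PySem.Str.lower p.2)
          = PySem.Str.lower ∘ (fun p : Int × String => p.2) from rfl,
        ← List.map_map, PySem.List.map_snd_enumerate]
    rw [this, PySem.List.dedup_eq_ofList]
    rfl
  rw [hkeys]
  refine List.map_congr_left (fun k _ => ?_)
  have hfold : (List.foldl (fun d p =>
      d.modify (PySem.Str.lower p.2) [] (fun l => l ++ [p.1]))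
      (PySem.Dict.empty : PySem.Dict String (List Int)) e)
      = List.foldl (fun d p => d.modify p.1 [] (fun l => l ++ [p.2]))
        (PySem.Dict.empty : PySem.Dict String (List Int))
        (e.map (fun p => (PySem.Str.lower p.2, p.1))) := by
    rw [List.foldl_map]
  rw [hfold, PySem.Dict.getD_foldl_modify_append, PySem.Dict.getD_empty, List.nil_append]
  rw [he, pv_enumerate_map]
  simp [List.filter_map, List.map_map, Function.comp_def]

-- ===== VERDICT (by name: the statement is the Claim_ definition above) =====
theorem track_word_positions_spec : Claim_equal_track_word_positions := by
  intro text _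
  exact pv_main text
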